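-- pv_equiv track=rewrite | github.com/mesutarslan44/mesutborsabist30 | python/performance_tracker.py | _dedupe_open_targets
-- ===== SOURCE A (Python) =====
-- def _target_key(item):
--     return (item.get("ticker"), item.get("period"))
--
-- def _dedupe_open_targets(open_targets):
--     deduped = []
--     seen = set()
--     ordered = sorted(open_targets, key=lambda x: x.get("opened_at", ""), reverse=True)
--     for target in ordered:
--         key = _target_key(target)
--         if key in seen:
--             continue
--         seen.add(key)
--         deduped.append(target)
--     return deduped
-- ===== SOURCE B (Python) =====
-- def _target_key(item):
--     return (item.get("ticker"), item.get("period"))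
--
-- def _dedupe_open_targets(open_targets):
--     # Group first: one pass keeps, per key, the target with the greatest
--     # opened_at (earliest original position wins ties); then sort only the
--     # kept targets (pre-ordered by original position) descending by opened_at.
--     best = {}
--     for idx, item in enumerate(open_targets):
--         key = _target_key(item)
--         cur = best.get(key)
--         if cur is None or cur[1].get("opened_at", "") < item.get("opened_at", ""):
--             best[key] = (idx, item)
--     kept = sorted(best.values(), key=lambda p: p[0])
--     ranked = sorted(kept, key=lambda p: p[1].get("opened_at", ""), reverse=True)
--     return [item for _, item in ranked]
-- ===== Notes on version B (the rewrite author's own statement) =====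
-- stated objective: alternative
-- what changed: A sorts the whole list descending by opened_at and then linearly drops later duplicates with a seen-set; B first groups in one dict pass keeping per (ticker, period) key the target with the greatest opened_at (earliest position wins ties), then sorts only the k kept targets (pre-ordered by original index) descending by opened_at.
import Mathlib
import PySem

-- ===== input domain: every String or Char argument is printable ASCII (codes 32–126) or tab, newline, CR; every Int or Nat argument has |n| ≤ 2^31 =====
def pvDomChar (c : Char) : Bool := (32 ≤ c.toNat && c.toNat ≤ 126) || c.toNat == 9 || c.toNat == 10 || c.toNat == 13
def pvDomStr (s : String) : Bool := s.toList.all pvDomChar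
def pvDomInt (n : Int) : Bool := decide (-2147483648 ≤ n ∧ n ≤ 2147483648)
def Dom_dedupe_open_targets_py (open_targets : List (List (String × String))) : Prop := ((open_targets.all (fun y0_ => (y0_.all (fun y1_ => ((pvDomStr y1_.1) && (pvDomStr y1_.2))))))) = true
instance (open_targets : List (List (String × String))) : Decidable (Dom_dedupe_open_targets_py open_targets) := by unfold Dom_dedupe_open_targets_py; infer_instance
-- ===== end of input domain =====

-- B replaces A's sort-everything-then-dedupe by group-first (one dict pass keeping the
-- best target per key) and then sorts only the kept targets: an alternative decomposition.

-- ===== PORT A =====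
-- item.get(k) on a Python dict (assoc list, first match)
def pvGet (it : List (String × String)) (k : String) : Option String :=
  (PySem.Dict.mk it).get? k

-- item.get("opened_at", "")
def pv_ok (it : List (String × String)) : String :=
  (PySem.Dict.mk it).getD "opened_at" ""

-- _target_key(item) = (item.get("ticker"), item.get("period"))
def pv_tkey (it : List (String × String)) : Option String × Option String :=
  (pvGet it "ticker", pvGet it "period")

def dedupe_open_targets_py (open_targets : List (List (String × String))) : List (List (String × String)) :=
  let ordered := PySem.List.sorted open_targets pv_ok true
  (ordered.foldl
    (fun (st : List (List (String × String)) × PySem.Set (Option String × Option String)) target =>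
      if PySem.Set.contains st.2 (pv_tkey target) then st
      else (st.1 ++ [target], PySem.Set.add st.2 (pv_tkey target)))
    ([], PySem.Set.empty)).1

-- ===== PORT B =====
-- one step of B's grouping pass: keep the incumbent unless the new target's opened_at is strictly greater
def pv_best_step
    (d : PySem.Dict (Option String × Option String) (Int × List (String × String)))
    (p : Int × List (String × String)) :
    PySem.Dict (Option String × Option String) (Int × List (String × String)) :=
  match d.get? (pv_tkey p.2) with
  | none => d.insert (pv_tkey p.2) p
  | some cur => if pv_ok cur.2 < pv_ok p.2 then d.insert (pv_tkey p.2) p else d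

def dedupe_open_targets_py_alt (open_targets : List (List (String × String))) : List (List (String × String)) :=
  let best := (PySem.List.enumerate open_targets).foldl pv_best_step PySem.Dict.empty
  let kept := PySem.List.sorted best.values (fun p => p.1) false
  let ranked := PySem.List.sorted kept (fun p => pv_ok p.2) true
  ranked.map (fun p => p.2)

-- ===== PRECONDITION & SPEC =====
def Spec_dedupe_open_targets_py (open_targets : List (List (String × String))) (out : List (List (String × String))) : Prop := out = dedupe_open_targets_py_alt open_targets
instance (open_targets : List (List (String × String))) (out : List (List (String × String))) : Decidable (Spec_dedupe_open_targets_py open_targets out) := by unfold Spec_dedupe_open_targets_py; infer_instance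

-- ===== CLAIM (what is proved, stated in full; the proofs are below) =====
def Claim_equal_dedupe_open_targets_py : Prop := ∀ (open_targets : List (List (String × String))), Dom_dedupe_open_targets_py open_targets → Spec_dedupe_open_targets_py open_targets (dedupe_open_targets_py open_targets)

-- ===== LEMMAS AND PROOFS =====

-- The strict "ranking" order on enumerated targets: opened_at descending, original index ascending.
def pvr (p q : Int × List (String × String)) : Prop :=
  pv_ok q.2 < pv_ok p.2 ∨ (pv_ok p.2 = pv_ok q.2 ∧ p.1 < q.1)

def pvrB (p q : Int × List (String × String)) : Bool :=
  decide (pv_ok q.2 < pv_ok p.2) || (decide (pv_ok p.2 = pv_ok q.2) && decide (p.1 < q.1))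

theorem pvrB_iff (p q : Int × List (String × String)) : pvrB p q = true ↔ pvr p q := by
  simp [pvrB, pvr]

theorem pvr_trans {p q r : Int × List (String × String)} (h1 : pvr p q) (h2 : pvr q r) : pvr p r := by
  rcases h1 with h1 | ⟨e1, i1⟩ <;> rcases h2 with h2 | ⟨e2, i2⟩
  · exact Or.inl (lt_trans h2 h1)
  · exact Or.inl (e2 ▸ h1)
  · exact Or.inl (e1 ▸ h2)
  · exact Or.inr ⟨e1.trans e2, lt_trans i1 i2⟩

theorem pvr_asymm {p q : Int × List (String × String)} (h1 : pvr p q) (h2 : pvr q p) : False := by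
  rcases h1 with h1 | ⟨e1, i1⟩ <;> rcases h2 with h2 | ⟨e2, i2⟩
  · exact absurd h1 (not_lt_of_gt h2)
  · exact absurd h1 (e2 ▸ lt_irrefl _)
  · exact absurd h2 (e1 ▸ lt_irrefl _)
  · exact absurd (lt_trans i1 i2) (lt_irrefl _)

theorem pvr_total {p q : Int × List (String × String)} (h : p.1 ≠ q.1) : pvr p q ∨ pvr q p := by
  rcases lt_trichotomy (pv_ok p.2) (pv_ok q.2) with hlt | heq | hgt
  · exact Or.inr (Or.inl hlt)
  · rcases lt_or_gt_of_ne h with hi | hi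
    · exact Or.inl (Or.inr ⟨heq, hi⟩)
    · exact Or.inr (Or.inr ⟨heq.symm, hi⟩)
  · exact Or.inl (Or.inl hgt)

-- the r-insertion sort of enumerated targets
def pvRsort (l : List (Int × List (String × String))) : List (Int × List (String × String)) :=
  l.foldl (fun acc p => PySem.List.insertBy pvrB p acc) []

-- first-occurrence-per-key dedup on enumerated targets (pair version of A's loop)
def pvDed : List (Int × List (String × String)) → PySem.Set (Option String × Option String) → List (Int × List (String × String))
  | [], _ => []
  | p :: l, s =>
    if PySem.Set.contains s (pv_tkey p.2) then pvDed l s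
    else p :: pvDed l (PySem.Set.add s (pv_tkey p.2))

-- per-key running best (pointwise content of B's dict fold)
def pvUpd (o : Option (Int × List (String × String))) (q : Int × List (String × String)) : Option (Int × List (String × String)) :=
  match o with
  | none => some q
  | some c => if pv_ok c.2 < pv_ok q.2 then some q else some c

-- "p is the kept (winning) target of its key in e"
def pvWin (e : List (Int × List (String × String))) (p : Int × List (String × String)) : Prop :=
  p ∈ e ∧ ∀ q ∈ e, pv_tkey q.2 = pv_tkey p.2 → q = p ∨ pvr p q

theorem insertBy_congr {α : Type} (c1 c2 : α → α → Bool) (x : α) (l : List α)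
    (h : ∀ y ∈ l, c1 x y = c2 x y) :
    PySem.List.insertBy c1 x l = PySem.List.insertBy c2 x l := by
  induction l with
  | nil => rfl
  | cons y ys ih =>
    simp only [PySem.List.insertBy]
    rw [h y (by simp)]
    split
    · rfl
    · rw [ih (fun z hz => h z (by simp [hz]))]

theorem insertBy_perm {α : Type} (c : α → α → Bool) (x : α) (l : List α) :
    (PySem.List.insertBy c x l).Perm (x :: l) := by
  induction l with
  | nil => simp [PySem.List.insertBy]
  | cons y ys ih =>
    simp only [PySem.List.insertBy]
    split
    · exact List.Perm.refl _
    · exact (List.Perm.cons y ih).trans (List.Perm.swap x y ys)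

theorem map_snd_insertBy (p : Int × List (String × String)) (l : List (Int × List (String × String)))
    (h : ∀ q ∈ l, q.1 < p.1) :
    (PySem.List.insertBy pvrB p l).map (fun x => x.2)
      = PySem.List.insertBy (fun a b => decide (pv_ok b < pv_ok a)) p.2 (l.map (fun x => x.2)) := by
  induction l with
  | nil => rfl
  | cons y ys ih =>
    have hy : y.1 < p.1 := h y (by simp)
    have hb : pvrB p y = decide (pv_ok y.2 < pv_ok p.2) := by
      simp only [pvrB]
      have : ¬ (p.1 < y.1) := by omega
      simp [this]
    simp only [PySem.List.insertBy, List.map, hb]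
    split
    · simp
    · simp only [List.map]
      rw [ih (fun q hq => h q (by simp [hq]))]

theorem foldl_insertBy_snd (l acc : List (Int × List (String × String)))
    (hl : l.Pairwise (fun p q => p.1 < q.1))
    (hacc : ∀ q ∈ acc, ∀ p ∈ l, q.1 < p.1) :
    (l.foldl (fun a p => PySem.List.insertBy pvrB p a) acc).map (fun x => x.2)
      = (l.map (fun x => x.2)).foldl
          (fun a x => PySem.List.insertBy (fun a b => decide (pv_ok b < pv_ok a)) x a)
          (acc.map (fun x => x.2)) := by
  induction l generalizing acc with
  | nil => rfl
  | cons p ps ih =>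
    rcases List.pairwise_cons.mp hl with ⟨hp, hps⟩
    simp only [List.foldl_cons, List.map_cons]
    rw [ih _ hps ?hacc', map_snd_insertBy p acc (fun q hq => hacc q hq p (by simp))]
    case hacc' =>
      intro q hq z hz
      rcases (PySem.List.mem_insertBy _ _ _ _).mp hq with rfl | hq'
      · exact hp z hz
      · exact hacc q hq' z (by simp [hz])

theorem foldl_insertBy_ok_eq (l acc : List (Int × List (String × String)))
    (hl : l.Pairwise (fun p q => p.1 < q.1))
    (hacc : ∀ q ∈ acc, ∀ p ∈ l, q.1 < p.1) :
    l.foldl (fun a p => PySem.List.insertBy (fun (x y : Int × List (String × String)) => decide (pv_ok y.2 < pv_ok x.2)) p a) acc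
      = l.foldl (fun a p => PySem.List.insertBy pvrB p a) acc := by
  induction l generalizing acc with
  | nil => rfl
  | cons p ps ih =>
    rcases List.pairwise_cons.mp hl with ⟨hp, hps⟩
    simp only [List.foldl_cons]
    rw [insertBy_congr _ pvrB p acc ?hcongr, ih _ hps ?hacc']
    case hcongr =>
      intro y hy
      have hlt : y.1 < p.1 := hacc y hy p (by simp)
      have : ¬ (p.1 < y.1) := by omega
      simp [pvrB, this]
    case hacc' =>
      intro q hq z hz
      rcases (PySem.List.mem_insertBy _ _ _ _).mp hq with rfl | hq'
      · exact hp z hz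
      · exact hacc q hq' z (by simp [hz])

theorem pairwise_insertBy (p : Int × List (String × String)) (l : List (Int × List (String × String)))
    (hl : l.Pairwise pvr) (hne : ∀ y ∈ l, p.1 ≠ y.1) :
    (PySem.List.insertBy pvrB p l).Pairwise pvr := by
  induction l with
  | nil => simp [PySem.List.insertBy]
  | cons y ys ih =>
    rcases List.pairwise_cons.mp hl with ⟨hy, hys⟩
    simp only [PySem.List.insertBy]
    split
    · rename_i hb
      have hpy : pvr p y := (pvrB_iff p y).mp hb
      refine List.pairwise_cons.mpr ⟨?_, hl⟩
      intro z hz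
      rcases List.mem_cons.mp hz with rfl | hz'
      · exact hpy
      · exact pvr_trans hpy (hy z hz')
    · rename_i hb
      have hyp : pvr y p := by
        rcases pvr_total (hne y (by simp)) with h | h
        · exact absurd ((pvrB_iff p y).mpr h) hb
        · exact h
      refine List.pairwise_cons.mpr ⟨?_, ih hys (fun z hz => hne z (by simp [hz]))⟩
      intro z hz
      rcases (PySem.List.mem_insertBy _ _ _ _).mp hz with rfl | hz'
      · exact hyp
      · exact hy z hz'

theorem foldl_insertBy_perm (l acc : List (Int × List (String × String))) :
    (l.foldl (fun a p => PySem.List.insertBy pvrB p a) acc).Perm (acc ++ l) := by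
  induction l generalizing acc with
  | nil => simp
  | cons p ps ih =>
    simp only [List.foldl_cons]
    refine (ih _).trans ?_
    refine (List.Perm.append_right ps (insertBy_perm pvrB p acc)).trans ?_
    simpa using List.perm_middle.symm

theorem foldl_insertBy_pairwise (l acc : List (Int × List (String × String)))
    (hl : l.Pairwise (fun p q => p.1 < q.1))
    (hacc1 : acc.Pairwise pvr)
    (hacc2 : ∀ q ∈ acc, ∀ p ∈ l, q.1 ≠ p.1) :
    (l.foldl (fun a p => PySem.List.insertBy pvrB p a) acc).Pairwise pvr := by
  induction l generalizing acc with
  | nil => exact hacc1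
  | cons p ps ih =>
    rcases List.pairwise_cons.mp hl with ⟨hp, hps⟩
    simp only [List.foldl_cons]
    refine ih _ hps (pairwise_insertBy p acc hacc1 ?_) ?_
    · exact fun y hy => (hacc2 y hy p (by simp)).symm
    · intro q hq z hz
      rcases (PySem.List.mem_insertBy _ _ _ _).mp hq with rfl | hq'
      · exact Int.ne_of_lt (hp z hz)
      · exact hacc2 q hq' z (by simp [hz])

theorem pairwise_mem_total {α : Type} {R : α → α → Prop} {l : List α} (h : l.Pairwise R)
    {p q : α} (hp : p ∈ l) (hq : q ∈ l) : p = q ∨ R p q ∨ R q p := by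
  induction l with
  | nil => cases hp
  | cons a t ih =>
    rcases List.pairwise_cons.mp h with ⟨ha, ht⟩
    rcases List.mem_cons.mp hp with rfl | hp' <;> rcases List.mem_cons.mp hq with rfl | hq'
    · exact Or.inl rfl
    · exact Or.inr (Or.inl (ha q hq'))
    · exact Or.inr (Or.inr (ha p hp'))
    · exact ih ht hp' hq'

theorem a_fold_eq (L : List (Int × List (String × String)))
    (out : List (List (String × String))) (s : PySem.Set (Option String × Option String)) :
    ((L.map (fun x => x.2)).foldl
      (fun (st : List (List (String × String)) × PySem.Set (Option String × Option String)) target =>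
        if PySem.Set.contains st.2 (pv_tkey target) then st
        else (st.1 ++ [target], PySem.Set.add st.2 (pv_tkey target)))
      (out, s)).1
    = out ++ (pvDed L s).map (fun x => x.2) := by
  rw [List.foldl_map]
  induction L generalizing out s with
  | nil => simp [pvDed]
  | cons p l ih =>
    simp only [List.foldl_cons, pvDed]
    split
    · exact ih out s
    · rw [ih (out ++ [p.2]) _]
      simp

theorem pvDed_sublist (L : List (Int × List (String × String))) (s : PySem.Set (Option String × Option String)) :
    (pvDed L s).Sublist L := by
  induction L generalizing s with
  | nil => simp [pvDed]
  | cons p l ih =>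
    simp only [pvDed]
    split
    · exact (ih s).trans (List.sublist_cons_self p l)
    · exact List.Sublist.cons₂ p (ih _)

theorem pvDed_mem (L : List (Int × List (String × String))) (s : PySem.Set (Option String × Option String))
    (hL : L.Pairwise pvr) (p : Int × List (String × String)) :
    p ∈ pvDed L s ↔ p ∈ L ∧ pv_tkey p.2 ∉ s ∧ ∀ q ∈ L, pv_tkey q.2 = pv_tkey p.2 → q = p ∨ pvr p q := by
  induction L generalizing s with
  | nil => simp [pvDed]
  | cons p0 l ih =>
    rcases List.pairwise_cons.mp hL with ⟨hp0, hl⟩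
    by_cases hc : pv_tkey p0.2 ∈ s
    · have hcb : PySem.Set.contains s (pv_tkey p0.2) = true := by
        simpa [PySem.Set.contains] using hc
      simp only [pvDed, hcb, if_true]
      rw [ih s hl]
      constructor
      · rintro ⟨hm, hns, hmin⟩
        refine ⟨by simp [hm], hns, ?_⟩
        intro q hq hkey
        rcases List.mem_cons.mp hq with rfl | hq'
        · exact absurd (hkey ▸ hc) hns
        · exact hmin q hq' hkey
      · rintro ⟨hm, hns, hmin⟩
        rcases List.mem_cons.mp hm with rfl | hm'
        · exact absurd hc hns
        · exact ⟨hm', hns, fun q hq hkey => hmin q (by simp [hq]) hkey⟩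
    · have hcb : PySem.Set.contains s (pv_tkey p0.2) = false := by
        simp only [PySem.Set.contains]
        simpa using hc
      simp only [pvDed, hcb, Bool.false_eq_true, if_false, List.mem_cons]
      rw [ih _ hl]
      by_cases hpp : p = p0
      · subst hpp
        simp only [true_or, true_iff]
        refine ⟨by simp, hc, ?_⟩
        intro q hq hkey
        rcases hq with rfl | hq'
        · exact Or.inl rfl
        · exact Or.inr (hp0 q hq')
      · simp only [hpp, false_or]
        constructor
        · rintro ⟨hm, hns, hmin⟩
          have hns' : pv_tkey p.2 ∉ s ∧ pv_tkey p.2 ≠ pv_tkey p0.2 := by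
            rw [PySem.Set.mem_add] at hns
            exact ⟨fun h => hns (Or.inl h), fun h => hns (Or.inr h)⟩
          refine ⟨hm, hns'.1, ?_⟩
          intro q hq hkey
          rcases hq with rfl | hq'
          · exact absurd hkey.symm hns'.2
          · exact hmin q hq' hkey
        · rintro ⟨hm', hns, hmin⟩
          refine ⟨hm', ?_, fun q hq hkey => hmin q (Or.inr hq) hkey⟩
          rw [PySem.Set.mem_add]
          rintro (h | h)
          · exact hns h
          · rcases hmin p0 (Or.inl rfl) h.symm with h2 | h2
            · exact hpp h2.symm
            · exact pvr_asymm h2 (hp0 p hm')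

theorem best_get? (l : List (Int × List (String × String)))
    (d : PySem.Dict (Option String × Option String) (Int × List (String × String)))
    (k : Option String × Option String) :
    (l.foldl pv_best_step d).get? k
      = (l.filter (fun q => pv_tkey q.2 == k)).foldl pvUpd (d.get? k) := by
  induction l generalizing d with
  | nil => simp
  | cons p l ih =>
    simp only [List.foldl_cons, List.filter_cons]
    by_cases hk : pv_tkey p.2 = k
    · have hb : (pv_tkey p.2 == k) = true := beq_iff_eq.mpr hk
      simp only [hb, if_true, List.foldl_cons]
      rw [ih]
      congr 1
      unfold pv_best_step
      rcases hd : (d.get? (pv_tkey p.2)) with _ | cur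
      · rw [PySem.Dict.get?_insert, if_pos hk.symm, ← hk, hd]
        rfl
      · dsimp only
        split_ifs with hok
        · rw [PySem.Dict.get?_insert, if_pos hk.symm, ← hk, hd]
          simp [pvUpd, hok]
        · rw [← hk, hd]
          simp [pvUpd, hok]
    · have hb : (pv_tkey p.2 == k) = false := by simpa using hk
      simp only [hb, Bool.false_eq_true, if_false]
      rw [ih]
      congr 1
      unfold pv_best_step
      rcases hd : (d.get? (pv_tkey p.2)) with _ | cur
      · rw [PySem.Dict.get?_insert, if_neg (fun h => hk h.symm)]
      · dsimp only
        split_ifs with hok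
        · rw [PySem.Dict.get?_insert, if_neg (fun h => hk h.symm)]
        · rfl

theorem best_keys_nodup (l : List (Int × List (String × String)))
    (d : PySem.Dict (Option String × Option String) (Int × List (String × String)))
    (hd : d.keys.Nodup) : (l.foldl pv_best_step d).keys.Nodup := by
  induction l generalizing d with
  | nil => exact hd
  | cons p l ih =>
    simp only [List.foldl_cons]
    refine ih _ ?_
    rcases hg : (d.get? (pv_tkey p.2)) with _ | cur
    · simp only [pv_best_step, hg]
      exact PySem.Dict.nodup_keys_insert d _ _ hd
    · simp only [pv_best_step, hg]
      split_ifs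
      · exact PySem.Dict.nodup_keys_insert d _ _ hd
      · exact hd

theorem upd_char_aux (cls : List (Int × List (String × String)))
    (hcls : cls.Pairwise (fun p q => p.1 < q.1)) :
    ∀ (c : Int × List (String × String)), (∀ q ∈ cls, c.1 < q.1) →
    ∀ p, (cls.foldl pvUpd (some c) = some p ↔
      ((p = c ∨ p ∈ cls) ∧ ∀ q, (q = c ∨ q ∈ cls) → q = p ∨ pvr p q)) := by
  induction cls with
  | nil =>
    intro c hc p
    simp only [List.foldl_nil, List.not_mem_nil, or_false]
    constructor
    · intro h
      rcases Option.some.inj h with rfl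
      exact ⟨rfl, by rintro q rfl; exact Or.inl rfl⟩
    · rintro ⟨rfl, _⟩
      rfl
  | cons q0 rest ih =>
    intro c hc p
    rcases List.pairwise_cons.mp hcls with ⟨hq0, hrest⟩
    simp only [List.foldl_cons, List.mem_cons, pvUpd]
    by_cases hok : pv_ok c.2 < pv_ok q0.2
    · rw [if_pos hok, ih hrest q0 (fun q hq => hq0 q hq) p]
      have hq0c : pvr q0 c := Or.inl hok
      constructor
      · rintro ⟨hm, hmin⟩
        refine ⟨Or.inr hm, ?_⟩
        rintro q (rfl | hq)
        · rcases hmin q0 (Or.inl rfl) with h | h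
          · exact Or.inr (h ▸ hq0c)
          · exact Or.inr (pvr_trans h hq0c)
        · exact hmin q hq
      · rintro ⟨hm, hmin⟩
        have hpc : p ≠ c := by
          rintro rfl
          rcases hmin q0 (Or.inr (Or.inl rfl)) with h | h
          · have h2 := hc q0 (by simp)
            rw [h] at h2
            exact absurd h2 (lt_irrefl _)
          · exact pvr_asymm h hq0c
        rcases hm with rfl | hm'
        · exact absurd rfl hpc
        · exact ⟨hm', fun q hq => hmin q (Or.inr hq)⟩
    · rw [if_neg hok, ih hrest c (fun q hq => hc q (by simp [hq])) p]
      have hcq0 : pvr c q0 := by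
        rcases lt_or_eq_of_le (not_lt.mp hok) with h | h
        · exact Or.inl h
        · exact Or.inr ⟨h.symm, hc q0 (by simp)⟩
      constructor
      · rintro ⟨hm, hmin⟩
        refine ⟨by tauto, ?_⟩
        rintro q (hq | rfl | hq)
        · exact hmin q (Or.inl hq)
        · rcases hmin c (Or.inl rfl) with h | h
          · exact Or.inr (h ▸ hcq0)
          · exact Or.inr (pvr_trans h hcq0)
        · exact hmin q (Or.inr hq)
      · rintro ⟨hm, hmin⟩
        have hpq0 : p ≠ q0 := by
          rintro rfl
          rcases hmin c (Or.inl rfl) with h | h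
          · have h2 := hc p (by simp)
            rw [h] at h2
            exact absurd h2 (lt_irrefl _)
          · exact pvr_asymm h hcq0
        rcases hm with h | rfl | hm'
        · exact ⟨Or.inl h, fun q hq => hmin q (by tauto)⟩
        · exact absurd rfl hpq0
        · exact ⟨Or.inr hm', fun q hq => hmin q (by tauto)⟩

theorem upd_char (cls : List (Int × List (String × String)))
    (hcls : cls.Pairwise (fun p q => p.1 < q.1)) (p : Int × List (String × String)) :
    cls.foldl pvUpd none = some p ↔ (p ∈ cls ∧ ∀ q ∈ cls, q = p ∨ pvr p q) := by
  cases cls with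
  | nil => simp
  | cons q0 rest =>
    rcases List.pairwise_cons.mp hcls with ⟨hq0, hrest⟩
    simp only [List.foldl_cons, pvUpd]
    rw [upd_char_aux rest hrest q0 (fun q hq => hq0 q hq) p]
    simp only [List.mem_cons]

theorem mem_values_best (xs : List (List (String × String))) (p : Int × List (String × String)) :
    p ∈ ((PySem.List.enumerate xs).foldl pv_best_step PySem.Dict.empty).values
      ↔ pvWin (PySem.List.enumerate xs) p := by
  have hnod : ((PySem.List.enumerate xs).foldl pv_best_step PySem.Dict.empty).keys.Nodup := by
    refine best_keys_nodup _ _ ?_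
    simp [PySem.Dict.empty, PySem.Dict.keys]
  have hcls : ∀ (k : Option String × Option String),
      ((PySem.List.enumerate xs).filter (fun q => pv_tkey q.2 == k)).Pairwise (fun p q => p.1 < q.1) :=
    fun k => List.Pairwise.sublist List.filter_sublist (PySem.List.pairwise_lt_enumerate xs 0)
  simp only [PySem.Dict.values, List.mem_map]
  constructor
  · rintro ⟨kv, hkv, rfl⟩
    have hg : ((PySem.List.enumerate xs).foldl pv_best_step PySem.Dict.empty).get? kv.1 = some kv.2 :=
      (PySem.Dict.get?_eq_some_iff_mem_items _ kv.1 kv.2 hnod).mpr (by simpa using hkv)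
    rw [best_get? _ _ kv.1, PySem.Dict.get?_empty] at hg
    rcases (upd_char _ (hcls kv.1) kv.2).mp hg with ⟨hmem, hmin⟩
    have hf := List.mem_filter.mp hmem
    have hkey : pv_tkey kv.2.2 = kv.1 := beq_iff_eq.mp hf.2
    refine ⟨hf.1, ?_⟩
    intro q hq hk
    exact hmin q (List.mem_filter.mpr ⟨hq, beq_iff_eq.mpr (hk.trans hkey)⟩)
  · rintro ⟨hmem, hmin⟩
    have hg : ((PySem.List.enumerate xs).foldl pv_best_step PySem.Dict.empty).get? (pv_tkey p.2) = some p := by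
      rw [best_get? _ _ (pv_tkey p.2), PySem.Dict.get?_empty]
      refine (upd_char _ (hcls (pv_tkey p.2)) p).mpr ⟨List.mem_filter.mpr ⟨hmem, by simp⟩, ?_⟩
      intro q hq
      have hqf := List.mem_filter.mp hq
      exact hmin q hqf.1 (beq_iff_eq.mp hqf.2)
    exact ⟨(pv_tkey p.2, p), PySem.Dict.mem_items_of_get?_eq_some _ hg, rfl⟩

theorem values_best_nodup (xs : List (List (String × String))) :
    ((PySem.List.enumerate xs).foldl pv_best_step PySem.Dict.empty).values.Nodup := by
  have hnod : ((PySem.List.enumerate xs).foldl pv_best_step PySem.Dict.empty).keys.Nodup := by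
    refine best_keys_nodup _ _ ?_
    simp [PySem.Dict.empty, PySem.Dict.keys]
  have hitems : ((PySem.List.enumerate xs).foldl pv_best_step PySem.Dict.empty).items.Nodup := by
    have := hnod
    simp only [PySem.Dict.keys] at this
    exact this.of_map _
  have hkeyof : ∀ kv ∈ ((PySem.List.enumerate xs).foldl pv_best_step PySem.Dict.empty).items,
      kv.1 = pv_tkey kv.2.2 := by
    intro kv hkv
    have hg : ((PySem.List.enumerate xs).foldl pv_best_step PySem.Dict.empty).get? kv.1 = some kv.2 :=
      (PySem.Dict.get?_eq_some_iff_mem_items _ kv.1 kv.2 hnod).mpr (by simpa using hkv)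
    rw [best_get? _ _ kv.1, PySem.Dict.get?_empty] at hg
    have hcls : ((PySem.List.enumerate xs).filter (fun q => pv_tkey q.2 == kv.1)).Pairwise (fun p q => p.1 < q.1) :=
      List.Pairwise.sublist List.filter_sublist (PySem.List.pairwise_lt_enumerate xs 0)
    rcases (upd_char _ hcls kv.2).mp hg with ⟨hmem, _⟩
    exact (beq_iff_eq.mp (List.mem_filter.mp hmem).2).symm
  simp only [PySem.Dict.values]
  refine List.Nodup.map_on ?_ hitems
  intro x hx y hy hxy
  have hk : x.1 = y.1 := by rw [hkeyof x hx, hkeyof y hy, hxy]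
  exact Prod.ext hk hxy

-- ===== VERDICT (by name: the statement is the Claim_ definition above) =====
theorem dedupe_open_targets_py_spec : Claim_equal_dedupe_open_targets_py := by
  intro xs _
  unfold Spec_dedupe_open_targets_py
  have he_lt := PySem.List.pairwise_lt_enumerate xs 0
  have he_nodup : (PySem.List.enumerate xs 0).Nodup :=
    List.Pairwise.imp (fun h heq => absurd (heq ▸ h) (lt_irrefl _)) he_lt
  -- A's stable descending sort is the snd-projection of the pvr-insertion sort of the enumeration
  have h1 : PySem.List.sorted xs pv_ok true = (pvRsort (PySem.List.enumerate xs 0)).map (fun x => x.2) := by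
    rw [PySem.List.sorted_rev_eq_foldl_insertBy]
    have h := foldl_insertBy_snd (PySem.List.enumerate xs 0) [] he_lt (by simp)
    rw [PySem.List.map_snd_enumerate] at h
    simpa [pvRsort] using h.symm
  have hRs_pair : (pvRsort (PySem.List.enumerate xs 0)).Pairwise pvr := by
    simpa [pvRsort] using foldl_insertBy_pairwise (PySem.List.enumerate xs 0) [] he_lt (by simp) (by simp)
  have hRs_perm : (pvRsort (PySem.List.enumerate xs 0)).Perm (PySem.List.enumerate xs 0) := by
    simpa [pvRsort] using foldl_insertBy_perm (PySem.List.enumerate xs 0) []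
  have hA : dedupe_open_targets_py xs
      = (pvDed (pvRsort (PySem.List.enumerate xs 0)) PySem.Set.empty).map (fun x => x.2) := by
    simp only [dedupe_open_targets_py]
    rw [h1]
    simpa using a_fold_eq (pvRsort (PySem.List.enumerate xs 0)) [] PySem.Set.empty
  -- B's kept values are exactly the winners
  have hv_mem := mem_values_best xs
  have hv_nodup := values_best_nodup xs
  have hk_perm : (PySem.List.sorted ((PySem.List.enumerate xs).foldl pv_best_step PySem.Dict.empty).values (fun p => p.1) false).Perm ((PySem.List.enumerate xs).foldl pv_best_step PySem.Dict.empty).values := PySem.List.sorted_perm _ _ _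
  have hk_nodup : (PySem.List.sorted ((PySem.List.enumerate xs).foldl pv_best_step PySem.Dict.empty).values (fun p => p.1) false).Nodup := (hk_perm.nodup_iff).mpr hv_nodup
  have hinj : ∀ p ∈ ((PySem.List.enumerate xs).foldl pv_best_step PySem.Dict.empty).values, ∀ q ∈ ((PySem.List.enumerate xs).foldl pv_best_step PySem.Dict.empty).values, p ≠ q → p.1 ≠ q.1 := by
    intro p hp q hq hne
    have hpe : p ∈ (PySem.List.enumerate xs 0) := ((hv_mem p).mp hp).1
    have hqe : q ∈ (PySem.List.enumerate xs 0) := ((hv_mem q).mp hq).1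
    rcases pairwise_mem_total he_lt hpe hqe with rfl | h | h
    · exact absurd rfl hne
    · exact ne_of_lt h
    · exact ne_of_gt h
  have hk_le : (PySem.List.sorted ((PySem.List.enumerate xs).foldl pv_best_step PySem.Dict.empty).values (fun p => p.1) false).Pairwise (fun p q => p.1 ≤ q.1) :=
    PySem.List.sorted_pairwise ((PySem.List.enumerate xs).foldl pv_best_step PySem.Dict.empty).values (fun p => p.1)
  have hk_lt : (PySem.List.sorted ((PySem.List.enumerate xs).foldl pv_best_step PySem.Dict.empty).values (fun p => p.1) false).Pairwise (fun p q => p.1 < q.1) := by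
    have hne : (PySem.List.sorted ((PySem.List.enumerate xs).foldl pv_best_step PySem.Dict.empty).values (fun p => p.1) false).Pairwise (fun p q => p ≠ q) := hk_nodup
    exact List.Pairwise.imp_of_mem
      (fun ha hb h => lt_of_le_of_ne h.1 (hinj _ (hk_perm.subset ha) _ (hk_perm.subset hb) h.2))
      (hk_le.and hne)
  -- B's final stable descending sort of kept is the pvr-insertion sort of kept
  have h2 : PySem.List.sorted (PySem.List.sorted ((PySem.List.enumerate xs).foldl pv_best_step PySem.Dict.empty).values (fun p => p.1) false) (fun p => pv_ok p.2) true = pvRsort (PySem.List.sorted ((PySem.List.enumerate xs).foldl pv_best_step PySem.Dict.empty).values (fun p => p.1) false) := by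
    rw [PySem.List.sorted_rev_eq_foldl_insertBy]
    simpa [pvRsort] using foldl_insertBy_ok_eq (PySem.List.sorted ((PySem.List.enumerate xs).foldl pv_best_step PySem.Dict.empty).values (fun p => p.1) false) [] hk_lt (by simp)
  have hB : dedupe_open_targets_py_alt xs = (pvRsort (PySem.List.sorted ((PySem.List.enumerate xs).foldl pv_best_step PySem.Dict.empty).values (fun p => p.1) false)).map (fun p => p.2) := by
    simp only [dedupe_open_targets_py_alt]
    rw [h2]
  have hB_pair : (pvRsort (PySem.List.sorted ((PySem.List.enumerate xs).foldl pv_best_step PySem.Dict.empty).values (fun p => p.1) false)).Pairwise pvr := by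
    simpa [pvRsort] using foldl_insertBy_pairwise (PySem.List.sorted ((PySem.List.enumerate xs).foldl pv_best_step PySem.Dict.empty).values (fun p => p.1) false) [] hk_lt (by simp) (by simp)
  have hB_perm : (pvRsort (PySem.List.sorted ((PySem.List.enumerate xs).foldl pv_best_step PySem.Dict.empty).values (fun p => p.1) false)).Perm (PySem.List.sorted ((PySem.List.enumerate xs).foldl pv_best_step PySem.Dict.empty).values (fun p => p.1) false) := by
    simpa [pvRsort] using foldl_insertBy_perm (PySem.List.sorted ((PySem.List.enumerate xs).foldl pv_best_step PySem.Dict.empty).values (fun p => p.1) false) []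
  -- the deduped pair list equals the sorted kept pair list
  have hA_sub := pvDed_sublist (pvRsort (PySem.List.enumerate xs 0)) PySem.Set.empty
  have hA_pair : (pvDed (pvRsort (PySem.List.enumerate xs 0)) PySem.Set.empty).Pairwise pvr :=
    List.Pairwise.sublist hA_sub hRs_pair
  have hA_nodup : (pvDed (pvRsort (PySem.List.enumerate xs 0)) PySem.Set.empty).Nodup :=
    hA_sub.nodup ((hRs_perm.nodup_iff).mpr he_nodup)
  have hA_mem : ∀ p, p ∈ pvDed (pvRsort (PySem.List.enumerate xs 0)) PySem.Set.empty ↔ pvWin (PySem.List.enumerate xs 0) p := by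
    intro p
    rw [pvDed_mem _ _ hRs_pair p]
    unfold pvWin
    constructor
    · rintro ⟨hm, -, hmin⟩
      exact ⟨hRs_perm.mem_iff.mp hm, fun q hq hk => hmin q (hRs_perm.mem_iff.mpr hq) hk⟩
    · rintro ⟨hm, hmin⟩
      exact ⟨hRs_perm.mem_iff.mpr hm, by simp [PySem.Set.empty],
        fun q hq hk => hmin q (hRs_perm.mem_iff.mp hq) hk⟩
  have hperm : (pvDed (pvRsort (PySem.List.enumerate xs 0)) PySem.Set.empty).Perm (pvRsort (PySem.List.sorted ((PySem.List.enumerate xs).foldl pv_best_step PySem.Dict.empty).values (fun p => p.1) false)) := by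
    have h3 : (pvDed (pvRsort (PySem.List.enumerate xs 0)) PySem.Set.empty).Perm ((PySem.List.enumerate xs).foldl pv_best_step PySem.Dict.empty).values :=
      (List.perm_ext_iff_of_nodup hA_nodup hv_nodup).mpr
        (fun p => (hA_mem p).trans ((hv_mem p)).symm)
    exact h3.trans (hk_perm.symm.trans hB_perm.symm)
  have heq : pvDed (pvRsort (PySem.List.enumerate xs 0)) PySem.Set.empty = pvRsort (PySem.List.sorted ((PySem.List.enumerate xs).foldl pv_best_step PySem.Dict.empty).values (fun p => p.1) false) :=
    List.Perm.eq_of_pairwise (fun _ _ _ _ ha hb => (pvr_asymm ha hb).elim) hA_pair hB_pair hperm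
  rw [hA, hB, heq]
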